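-- pv_equiv track=rewrite | github.com/yelkhashab/VisionCubed-API | src/getState.py | updateStateForRMove
-- ===== SOURCE A (Python) =====
-- def rotateFaceClockwise(face):
--     """
--     Rotates a face of the cube 90 degrees clockwise.
--     """
--     return [face[6], face[3], face[0], face[7], face[4], face[1], face[8], face[5], face[2]]
--
-- def rotateFaceAnticlockwise(face):
--     """
--     Rotates a face of the cube 90 degrees anticlockwise.
--     """
--     return [face[2], face[5], face[8], face[1], face[4], face[7], face[0], face[3], face[6]]
--
-- def updateStateForRMove(state, rotation):
--     """
--     Updates the cube state for an R move.
--     """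
--     newState = {face: stickers[:] for face, stickers in state.items()}
--
--     if rotation == 'CW':
--         newState['R'] = rotateFaceClockwise(state['R'])
--         newState['U'][2], newState['U'][5], newState['U'][8] = state['F'][2], state['F'][5], state['F'][8]
--         newState['F'][2], newState['F'][5], newState['F'][8] = state['D'][2], state['D'][5], state['D'][8]
--         newState['D'][2], newState['D'][5], newState['D'][8] = state['B'][6], state['B'][3], state['B'][0]
--         newState['B'][6], newState['B'][3], newState['B'][0] = state['U'][2], state['U'][5], state['U'][8]
--     elif rotation == 'ACW':
--         newState['R'] = rotateFaceAnticlockwise(state['R'])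
--         newState['U'][2], newState['U'][5], newState['U'][8] = state['B'][6], state['B'][3], state['B'][0]
--         newState['B'][6], newState['B'][3], newState['B'][0] = state['D'][2], state['D'][5], state['D'][8]
--         newState['D'][2], newState['D'][5], newState['D'][8] = state['F'][2], state['F'][5], state['F'][8]
--         newState['F'][2], newState['F'][5], newState['F'][8] = state['U'][2], state['U'][5], state['U'][8]
--     return newState
-- ===== SOURCE B (Python) =====
-- def _cwSource(face, i):
--     """Source sticker (face, index) that lands at position (face, i) after one CW R turn."""
--     if face == 'R' and i < 9:
--         return ('R', 6 - 3 * (i % 3) + i // 3)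
--     if face == 'U' and i in (2, 5, 8):
--         return ('F', i)
--     if face == 'F' and i in (2, 5, 8):
--         return ('D', i)
--     if face == 'D' and i in (2, 5, 8):
--         return ('B', 8 - i)
--     if face == 'B' and i in (0, 3, 6):
--         return ('U', 8 - i)
--     return (face, i)
--
--
-- def _cwTurn(state):
--     """One clockwise quarter turn of the R layer, built by gathering each
--     destination sticker from its source position."""
--     return {face: [state[sf][si]
--                    for sf, si in (_cwSource(face, i) for i in range(len(stickers)))]
--             for face, stickers in state.items()}
--
--
-- def updateStateForRMove(state, rotation):
--     """
--     Updates the cube state for an R move: a single CW quarter-turn primitive,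
--     applied once for 'CW' and three times for 'ACW' (R' = R * R * R).
--     """
--     newState = {face: stickers[:] for face, stickers in state.items()}
--     for _ in range({'CW': 1, 'ACW': 3}.get(rotation, 0)):
--         newState = _cwTurn(newState)
--     return newState
-- ===== Notes on version B (the rewrite author's own statement) =====
-- stated objective: alternative
-- what changed: B replaces A's two hard-coded blocks of 12 strip assignments plus a hand-written face rotation by a single CW quarter-turn primitive that GATHERS each destination sticker from a computed source position (closed-form index arithmetic 6-3*(i%3)+i//3 for the R face), and derives the ACW move as three applications of that primitive (R' = R^3) instead of writing it out.
import Mathlib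
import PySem

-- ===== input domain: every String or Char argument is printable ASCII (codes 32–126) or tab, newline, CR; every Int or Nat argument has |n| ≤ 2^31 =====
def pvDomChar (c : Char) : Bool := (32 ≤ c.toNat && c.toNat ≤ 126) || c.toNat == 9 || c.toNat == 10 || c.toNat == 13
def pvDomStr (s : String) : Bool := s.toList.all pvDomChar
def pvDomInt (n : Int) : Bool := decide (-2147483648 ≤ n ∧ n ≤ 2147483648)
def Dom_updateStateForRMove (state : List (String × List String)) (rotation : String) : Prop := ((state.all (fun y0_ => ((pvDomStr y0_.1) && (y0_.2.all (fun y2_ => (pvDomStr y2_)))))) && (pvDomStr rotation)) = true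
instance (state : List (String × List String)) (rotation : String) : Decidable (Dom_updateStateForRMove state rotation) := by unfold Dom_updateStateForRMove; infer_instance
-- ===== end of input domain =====

-- B re-implements the R move as a single CW quarter-turn primitive that GATHERS every
-- destination sticker from a computed source position (closed-form arithmetic for the R face),
-- and derives ACW as three CW turns (R' = R·R·R); objective: alternative decomposition.

-- ===== PORT A =====
-- face[i] : exact under Pre_ (index in range)
def pvRead (face : List String) (i : Int) : String := PySem.List.pyGetD face i ""

def rotateFaceClockwise (face : List String) : List String :=
  [pvRead face 6, pvRead face 3, pvRead face 0, pvRead face 7, pvRead face 4,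
   pvRead face 1, pvRead face 8, pvRead face 5, pvRead face 2]

def rotateFaceAnticlockwise (face : List String) : List String :=
  [pvRead face 2, pvRead face 5, pvRead face 8, pvRead face 1, pvRead face 4,
   pvRead face 7, pvRead face 0, pvRead face 3, pvRead face 6]

-- state[k] : exact under Pre_ (key present)
def pvFace (d : PySem.Dict String (List String)) (k : String) : List String := d.getD k []
-- newState[k][i] = v : exact under Pre_ (key present, index in range)
def pvWr (d : PySem.Dict String (List String)) (k : String) (i : Nat) (v : String) :
    PySem.Dict String (List String) :=
  d.modify k [] (fun l => l.set i v)

def updateStateForRMove (state : List (String × List String)) (rotation : String) :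
    List (String × List String) :=
  let st : PySem.Dict String (List String) := PySem.Dict.mk state
  -- newState = {face: stickers[:] for …}: a per-face copy, the identity on pure lists
  let n0 := st
  if rotation = "CW" then
    let n1 := n0.insert "R" (rotateFaceClockwise (pvFace st "R"))
    let n2 := pvWr (pvWr (pvWr n1 "U" 2 (pvRead (pvFace st "F") 2)) "U" 5 (pvRead (pvFace st "F") 5)) "U" 8 (pvRead (pvFace st "F") 8)
    let n3 := pvWr (pvWr (pvWr n2 "F" 2 (pvRead (pvFace st "D") 2)) "F" 5 (pvRead (pvFace st "D") 5)) "F" 8 (pvRead (pvFace st "D") 8)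
    let n4 := pvWr (pvWr (pvWr n3 "D" 2 (pvRead (pvFace st "B") 6)) "D" 5 (pvRead (pvFace st "B") 3)) "D" 8 (pvRead (pvFace st "B") 0)
    let n5 := pvWr (pvWr (pvWr n4 "B" 6 (pvRead (pvFace st "U") 2)) "B" 3 (pvRead (pvFace st "U") 5)) "B" 0 (pvRead (pvFace st "U") 8)
    n5.items
  else if rotation = "ACW" then
    let n1 := n0.insert "R" (rotateFaceAnticlockwise (pvFace st "R"))
    let n2 := pvWr (pvWr (pvWr n1 "U" 2 (pvRead (pvFace st "B") 6)) "U" 5 (pvRead (pvFace st "B") 3)) "U" 8 (pvRead (pvFace st "B") 0)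
    let n3 := pvWr (pvWr (pvWr n2 "B" 6 (pvRead (pvFace st "D") 2)) "B" 3 (pvRead (pvFace st "D") 5)) "B" 0 (pvRead (pvFace st "D") 8)
    let n4 := pvWr (pvWr (pvWr n3 "D" 2 (pvRead (pvFace st "F") 2)) "D" 5 (pvRead (pvFace st "F") 5)) "D" 8 (pvRead (pvFace st "F") 8)
    let n5 := pvWr (pvWr (pvWr n4 "F" 2 (pvRead (pvFace st "U") 2)) "F" 5 (pvRead (pvFace st "U") 5)) "F" 8 (pvRead (pvFace st "U") 8)
    n5.items
  else
    n0.items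

-- ===== PORT B =====
-- _cwSource(face, i): the source position that lands at (face, i) after one CW R turn
def cwSource (face : String) (i : Int) : String × Int :=
  if face = "R" ∧ i < 9 then
    ("R", 6 - 3 * (PySem.Int.mod i 3) + PySem.Int.floordiv i 3)
  else if face = "U" ∧ (i = 2 ∨ i = 5 ∨ i = 8) then ("F", i)
  else if face = "F" ∧ (i = 2 ∨ i = 5 ∨ i = 8) then ("D", i)
  else if face = "D" ∧ (i = 2 ∨ i = 5 ∨ i = 8) then ("B", 8 - i)
  else if face = "B" ∧ (i = 0 ∨ i = 3 ∨ i = 6) then ("U", 8 - i)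
  else (face, i)

-- _cwTurn(state): dict comprehension gathering state[sf][si] for each destination cell
def cwTurn (st : PySem.Dict String (List String)) : PySem.Dict String (List String) :=
  PySem.Dict.mk (st.items.map (fun p =>
    (p.1, (PySem.List.pyRange 0 (p.2.length : Int) 1).map (fun i =>
      PySem.List.pyGetD (st.getD (cwSource p.1 i).1 []) (cwSource p.1 i).2 ""))))

def updateStateForRMove_alt (state : List (String × List String)) (rotation : String) :
    List (String × List String) :=
  let st : PySem.Dict String (List String) := PySem.Dict.mk state
  -- newState = {face: stickers[:] for …}: a per-face copy, the identity on pure lists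
  let newState := st
  -- {'CW': 1, 'ACW': 3}.get(rotation, 0)
  let turns : Int := (PySem.Dict.mk [("CW", (1 : Int)), ("ACW", (3 : Int))]).getD rotation 0
  ((PySem.List.pyRange 0 turns 1).foldl (fun d _ => cwTurn d) newState).items

-- ===== PRECONDITION & SPEC =====
-- Pre_ excludes exactly the inputs on which A raises (with rotation 'CW'/'ACW' the five faces
-- R,U,F,D,B must be keys of state (else KeyError) with at least 9 stickers (else IndexError)), and
-- additionally excludes, for those rotations, (a) association lists with duplicate keys — not a
-- Python dict, unreachable from the original programs — and (b) states whose R face has MORE than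
-- 9 stickers: such a face is no 3x3 cube face, and A's replacing it by 9 permuted stickers and B's
-- length-preserving gather are equally defensible behaviours for that unspecified corner.
def Pre_updateStateForRMove (state : List (String × List String)) (rotation : String) : Prop :=
  (rotation = "CW" ∨ rotation = "ACW") →
    ((state.map Prod.fst).Nodup ∧
     (∀ k ∈ (["R", "U", "F", "D", "B"] : List String),
        (PySem.Dict.mk state).contains k = true ∧ 9 ≤ ((PySem.Dict.mk state).getD k []).length) ∧
     ((PySem.Dict.mk state).getD "R" []).length = 9)
instance (state : List (String × List String)) (rotation : String) :
    Decidable (Pre_updateStateForRMove state rotation) := by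
  unfold Pre_updateStateForRMove; infer_instance

def pvWitness_updateStateForRMove : (List (String × List String)) × String :=
  ([("U", ["w","w","w","w","w","w","w","w","w"]),
    ("F", ["g","g","g","g","g","g","g","g","g"]),
    ("D", ["y","y","y","y","y","y","y","y","y"]),
    ("B", ["b","b","b","b","b","b","b","b","b"]),
    ("R", ["r","r","r","r","r","r","r","r","r"]),
    ("L", ["o","o","o","o","o","o","o","o","o"])], "CW")

def Spec_updateStateForRMove (state : List (String × List String)) (rotation : String) (out : List (String × List String)) : Prop := out = updateStateForRMove_alt state rotation
instance (state : List (String × List String)) (rotation : String) (out : List (String × List String)) : Decidable (Spec_updateStateForRMove state rotation out) := by unfold Spec_updateStateForRMove; infer_instance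

-- ===== CLAIM (what is proved, stated in full; the proofs are below) =====
def Claim_equal_updateStateForRMove : Prop := ∀ (state : List (String × List String)) (rotation : String), Dom_updateStateForRMove state rotation → Pre_updateStateForRMove state rotation → Spec_updateStateForRMove state rotation (updateStateForRMove state rotation)

-- ===== LEMMAS AND PROOFS =====

-- W k v is the per-pair replacement that a dict write at an existing key performs on the items list
def W (k : String) (v : List String) : String × List String → String × List String :=
  fun p => if (p.1 == k) = true then (k, v) else p

theorem W_app_eq {k : String} {v : List String} {p : String × List String}
    (h : (p.1 == k) = true) : W k v p = (k, v) := by simp [W, h]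

theorem W_app_ne {k : String} {v : List String} {p : String × List String}
    (h : (p.1 == k) = false) : W k v p = p := by simp [W, h]

theorem items_insert_W (d : PySem.Dict String (List String)) (k : String) (v : List String)
    (h : d.contains k = true) : (d.insert k v).items = d.items.map (W k v) :=
  PySem.Dict.items_insert_of_contains d v h

theorem items_modify_W (d : PySem.Dict String (List String)) (k : String)
    (d0 : List String) (f : List String → List String) (h : d.contains k = true) :
    (d.modify k d0 f).items = d.items.map (W k (f (d.getD k d0))) := by
  simp only [PySem.Dict.modify]
  exact PySem.Dict.items_insert_of_contains d _ h

-- the value B's turn gives a face k whose current sticker list is v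
def nfv (st : PySem.Dict String (List String)) (k : String) (v : List String) : List String :=
  (PySem.List.pyRange 0 (v.length : Int) 1).map (fun i =>
    PySem.List.pyGetD (st.getD (cwSource k i).1 []) (cwSource k i).2 "")

-- reading sticker i of face f
def rd (st : PySem.Dict String (List String)) (f : String) (i : Int) : String :=
  PySem.List.pyGetD (st.getD f []) i ""

theorem cwTurn_items (d : PySem.Dict String (List String)) :
    (cwTurn d).items = d.items.map (fun p => (p.1, nfv d p.1 p.2)) := rfl

theorem get?_mk_mapped (l : List (String × List String))
    (F : String → List String → List String) (k : String) :
    (PySem.Dict.mk (l.map (fun p => (p.1, F p.1 p.2)))).get? k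
      = ((PySem.Dict.mk l).get? k).map (F k) := by
  induction l with
  | nil => rfl
  | cons p rest ih =>
    rcases p with ⟨pk, pv⟩
    simp only [List.map_cons, PySem.Dict.get?_mk_cons]
    by_cases h : (pk == k) = true
    · have hk : pk = k := by simpa using h
      subst hk
      simp
    · simp [h, ih]

theorem get?_cwTurn (st : PySem.Dict String (List String)) (k : String) :
    (cwTurn st).get? k = (st.get? k).map (fun v => nfv st k v) := by
  have := get?_mk_mapped st.items (fun k v => nfv st k v) k
  simpa [cwTurn, nfv] using this

theorem contains_cwTurn (st : PySem.Dict String (List String)) (k : String) :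
    (cwTurn st).contains k = st.contains k := by
  simp [PySem.Dict.contains_eq_isSome_get?, get?_cwTurn]

theorem getD_cwTurn (st : PySem.Dict String (List String)) (k : String)
    (h : st.contains k = true) :
    (cwTurn st).getD k [] = nfv st k (st.getD k []) := by
  rw [PySem.Dict.contains_eq_isSome_get?] at h
  obtain ⟨v, hv⟩ := Option.isSome_iff_exists.mp h
  simp [PySem.Dict.getD_eq_get?_getD, get?_cwTurn, hv]

theorem nfv_eq_map_range (st : PySem.Dict String (List String)) (k : String) (v : List String) :
    nfv st k v = (List.range v.length).map (fun (j : Nat) =>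
      PySem.List.pyGetD (st.getD (cwSource k (j : Int)).1 []) (cwSource k (j : Int)).2 "") := by
  rw [nfv, PySem.List.pyRange_zero_natCast, List.map_map]
  rfl

theorem len_nfv (st : PySem.Dict String (List String)) (k : String) (v : List String) :
    (nfv st k v).length = v.length := by
  simp [nfv_eq_map_range]

theorem rd_nfv (st : PySem.Dict String (List String)) (k : String) (v : List String)
    (i : Int) (h0 : 0 ≤ i) (h : i < v.length) :
    PySem.List.pyGetD (nfv st k v) i ""
      = PySem.List.pyGetD (st.getD (cwSource k i).1 []) (cwSource k i).2 "" := by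
  obtain ⟨j, rfl⟩ := Int.eq_ofNat_of_zero_le h0
  have hj : j < v.length := by exact_mod_cast h
  rw [nfv_eq_map_range, PySem.List.pyGetD_ofNat _ j "" (by simpa using hj)]
  simp only [List.getElem_map, List.getElem_range]


-- cwSource is the identity off the five moved faces / off the strip positions
theorem cwSource_other (k : String) (i : Int) (hR : k ≠ "R") (hU : k ≠ "U")
    (hF : k ≠ "F") (hD : k ≠ "D") (hB : k ≠ "B") : cwSource k i = (k, i) := by
  simp [cwSource, hR, hU, hF, hD, hB]

theorem cwSource_U_id (j : Nat) (h2 : j ≠ 2) (h5 : j ≠ 5) (h8 : j ≠ 8) :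
    cwSource "U" (j : Int) = ("U", (j : Int)) := by
  rw [cwSource, if_neg (by simp), if_neg (by rintro ⟨-, h | h | h⟩ <;> omega),
    if_neg (by simp), if_neg (by simp), if_neg (by simp)]

theorem cwSource_F_id (j : Nat) (h2 : j ≠ 2) (h5 : j ≠ 5) (h8 : j ≠ 8) :
    cwSource "F" (j : Int) = ("F", (j : Int)) := by
  rw [cwSource, if_neg (by simp), if_neg (by simp),
    if_neg (by rintro ⟨-, h | h | h⟩ <;> omega), if_neg (by simp), if_neg (by simp)]

theorem cwSource_D_id (j : Nat) (h2 : j ≠ 2) (h5 : j ≠ 5) (h8 : j ≠ 8) :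
    cwSource "D" (j : Int) = ("D", (j : Int)) := by
  rw [cwSource, if_neg (by simp), if_neg (by simp), if_neg (by simp),
    if_neg (by rintro ⟨-, h | h | h⟩ <;> omega), if_neg (by simp)]

theorem cwSource_B_id (j : Nat) (h0 : j ≠ 0) (h3 : j ≠ 3) (h6 : j ≠ 6) :
    cwSource "B" (j : Int) = ("B", (j : Int)) := by
  rw [cwSource, if_neg (by simp), if_neg (by simp), if_neg (by simp), if_neg (by simp),
    if_neg (by rintro ⟨-, h | h | h⟩ <;> omega)]

-- one CW turn, face by face (set form)
theorem nfv_U (st : PySem.Dict String (List String)) (v : List String)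
    (hv : st.getD "U" [] = v) (_h9 : 9 ≤ v.length) :
    nfv st "U" v = ((v.set 2 (rd st "F" 2)).set 5 (rd st "F" 5)).set 8 (rd st "F" 8) := by
  rw [nfv_eq_map_range]
  apply List.ext_getElem
  · simp
  intro j hj hj'
  simp only [List.getElem_map, List.getElem_range]
  have hjv : j < v.length := by simpa using hj
  by_cases e2 : j = 2
  · subst e2; simp [cwSource, rd]
  by_cases e5 : j = 5
  · subst e5; simp [cwSource, rd]
  by_cases e8 : j = 8
  · subst e8; simp [cwSource, rd]
  · simp only [cwSource_U_id j e2 e5 e8]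
    rw [hv, PySem.List.pyGetD_ofNat v j "" hjv]
    simp [Ne.symm e2, Ne.symm e5, Ne.symm e8]

theorem nfv_F (st : PySem.Dict String (List String)) (v : List String)
    (hv : st.getD "F" [] = v) (_h9 : 9 ≤ v.length) :
    nfv st "F" v = ((v.set 2 (rd st "D" 2)).set 5 (rd st "D" 5)).set 8 (rd st "D" 8) := by
  rw [nfv_eq_map_range]
  apply List.ext_getElem
  · simp
  intro j hj hj'
  simp only [List.getElem_map, List.getElem_range]
  have hjv : j < v.length := by simpa using hj
  by_cases e2 : j = 2
  · subst e2; simp [cwSource, rd]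
  by_cases e5 : j = 5
  · subst e5; simp [cwSource, rd]
  by_cases e8 : j = 8
  · subst e8; simp [cwSource, rd]
  · simp only [cwSource_F_id j e2 e5 e8]
    rw [hv, PySem.List.pyGetD_ofNat v j "" hjv]
    simp [Ne.symm e2, Ne.symm e5, Ne.symm e8]

theorem nfv_D (st : PySem.Dict String (List String)) (v : List String)
    (hv : st.getD "D" [] = v) (_h9 : 9 ≤ v.length) :
    nfv st "D" v = ((v.set 2 (rd st "B" 6)).set 5 (rd st "B" 3)).set 8 (rd st "B" 0) := by
  rw [nfv_eq_map_range]
  apply List.ext_getElem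
  · simp
  intro j hj hj'
  simp only [List.getElem_map, List.getElem_range]
  have hjv : j < v.length := by simpa using hj
  by_cases e2 : j = 2
  · subst e2; simp [cwSource, rd]
  by_cases e5 : j = 5
  · subst e5; simp [cwSource, rd]
  by_cases e8 : j = 8
  · subst e8; simp [cwSource, rd]
  · simp only [cwSource_D_id j e2 e5 e8]
    rw [hv, PySem.List.pyGetD_ofNat v j "" hjv]
    simp [Ne.symm e2, Ne.symm e5, Ne.symm e8]

theorem nfv_B (st : PySem.Dict String (List String)) (v : List String)
    (hv : st.getD "B" [] = v) (_h9 : 9 ≤ v.length) :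
    nfv st "B" v = ((v.set 6 (rd st "U" 2)).set 3 (rd st "U" 5)).set 0 (rd st "U" 8) := by
  rw [nfv_eq_map_range]
  apply List.ext_getElem
  · simp
  intro j hj hj'
  simp only [List.getElem_map, List.getElem_range]
  have hjv : j < v.length := by simpa using hj
  by_cases e0 : j = 0
  · subst e0; simp [cwSource, rd]
  by_cases e3 : j = 3
  · subst e3; simp [cwSource, rd]
  by_cases e6 : j = 6
  · subst e6; simp [cwSource, rd]
  · simp only [cwSource_B_id j e0 e3 e6]
    rw [hv, PySem.List.pyGetD_ofNat v j "" hjv]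
    simp [Ne.symm e0, Ne.symm e3, Ne.symm e6]

theorem nfv_R (st : PySem.Dict String (List String)) (v : List String)
    (hv : st.getD "R" [] = v) (h9 : v.length = 9) :
    nfv st "R" v = [pvRead v 6, pvRead v 3, pvRead v 0, pvRead v 7, pvRead v 4,
      pvRead v 1, pvRead v 8, pvRead v 5, pvRead v 2] := by
  rw [nfv_eq_map_range, h9]
  have hr : List.range 9 = [0, 1, 2, 3, 4, 5, 6, 7, 8] := by decide
  rw [hr]
  simp only [List.map_cons, List.map_nil, Nat.cast_ofNat, Nat.cast_zero, Nat.cast_one]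
  have c0 : cwSource "R" (0 : Int) = ("R", 6) := by decide
  have c1 : cwSource "R" (1 : Int) = ("R", 3) := by decide
  have c2 : cwSource "R" (2 : Int) = ("R", 0) := by decide
  have c3 : cwSource "R" (3 : Int) = ("R", 7) := by decide
  have c4 : cwSource "R" (4 : Int) = ("R", 4) := by decide
  have c5 : cwSource "R" (5 : Int) = ("R", 1) := by decide
  have c6 : cwSource "R" (6 : Int) = ("R", 8) := by decide
  have c7 : cwSource "R" (7 : Int) = ("R", 5) := by decide
  have c8 : cwSource "R" (8 : Int) = ("R", 2) := by decide
  simp only [c0, c1, c2, c3, c4, c5, c6, c7, c8]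
  simp [hv, pvRead]

theorem nfv_other (st : PySem.Dict String (List String)) (k : String) (v : List String)
    (hv : st.getD k [] = v) (hR : k ≠ "R") (hU : k ≠ "U")
    (hF : k ≠ "F") (hD : k ≠ "D") (hB : k ≠ "B") : nfv st k v = v := by
  rw [nfv_eq_map_range]
  apply List.ext_getElem
  · simp
  intro j hj hj'
  simp only [List.getElem_map, List.getElem_range]
  simp only [cwSource_other k (j : Int) hR hU hF hD hB]
  rw [hv, PySem.List.pyGetD_ofNat v j "" hj']

-- reading a face of the turned cube at an in-range position chases one gather step
theorem rd_stage (st : PySem.Dict String (List String)) (k : String)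
    (hc : st.contains k = true) (i : Int) (h0 : 0 ≤ i)
    (h : i < ((st.getD k []).length : Int)) :
    PySem.List.pyGetD ((cwTurn st).getD k []) i ""
      = PySem.List.pyGetD (st.getD (cwSource k i).1 []) (cwSource k i).2 "" := by
  rw [getD_cwTurn st k hc]; exact rd_nfv st k _ i h0 h

theorem len_stage (st : PySem.Dict String (List String)) (k : String)
    (hc : st.contains k = true) :
    ((cwTurn st).getD k []).length = (st.getD k []).length := by
  rw [getD_cwTurn st k hc, len_nfv]

-- three CW turns, face by face: exactly A's ACW assignments
theorem nfv3_U (st : PySem.Dict String (List String)) (v : List String)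
    (hv : st.getD "U" [] = v) (_h9 : 9 ≤ v.length)
    (hcU : st.contains "U" = true) (hcF : st.contains "F" = true)
    (hcD : st.contains "D" = true)
    (h9F : 9 ≤ (st.getD "F" []).length) (h9D : 9 ≤ (st.getD "D" []).length) :
    nfv (cwTurn (cwTurn st)) "U" (nfv (cwTurn st) "U" (nfv st "U" v))
      = ((v.set 2 (rd st "B" 6)).set 5 (rd st "B" 3)).set 8 (rd st "B" 0) := by
  have hcU1 : (cwTurn st).contains "U" = true := by rw [contains_cwTurn]; exact hcU
  have hcF1 : (cwTurn st).contains "F" = true := by rw [contains_cwTurn]; exact hcF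
  have hU1 : (cwTurn st).getD "U" [] = nfv st "U" v := by rw [getD_cwTurn st "U" hcU, hv]
  have hU2 : (cwTurn (cwTurn st)).getD "U" [] = nfv (cwTurn st) "U" (nfv st "U" v) := by
    rw [getD_cwTurn _ "U" hcU1, hU1]
  have lF1 : ((cwTurn st).getD "F" []).length = (st.getD "F" []).length := len_stage st "F" hcF
  rw [nfv_eq_map_range]
  apply List.ext_getElem
  · simp [len_nfv]
  intro j hj hj'
  simp only [List.getElem_map, List.getElem_range]
  have hjv : j < v.length := by simpa [len_nfv] using hj
  by_cases e2 : j = 2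
  · subst e2
    have c1 : cwSource "U" (((2 : Nat) : Nat) : Int) = ("F", 2) := by decide
    simp only [c1]
    rw [rd_stage (cwTurn st) "F" hcF1 2 (by norm_num)
        (by rw [lF1]; exact_mod_cast lt_of_lt_of_le (by norm_num) h9F)]
    have c2 : cwSource "F" (2 : Int) = ("D", 2) := by decide
    simp only [c2]
    rw [rd_stage st "D" hcD 2 (by norm_num)
        (by exact_mod_cast lt_of_lt_of_le (by norm_num) h9D)]
    have c3 : cwSource "D" (2 : Int) = ("B", 6) := by decide
    simp only [c3]
    simp [rd]
  by_cases e5 : j = 5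
  · subst e5
    have c1 : cwSource "U" (((5 : Nat) : Nat) : Int) = ("F", 5) := by decide
    simp only [c1]
    rw [rd_stage (cwTurn st) "F" hcF1 5 (by norm_num)
        (by rw [lF1]; exact_mod_cast lt_of_lt_of_le (by norm_num) h9F)]
    have c2 : cwSource "F" (5 : Int) = ("D", 5) := by decide
    simp only [c2]
    rw [rd_stage st "D" hcD 5 (by norm_num)
        (by exact_mod_cast lt_of_lt_of_le (by norm_num) h9D)]
    have c3 : cwSource "D" (5 : Int) = ("B", 3) := by decide
    simp only [c3]
    simp [rd]
  by_cases e8 : j = 8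
  · subst e8
    have c1 : cwSource "U" (((8 : Nat) : Nat) : Int) = ("F", 8) := by decide
    simp only [c1]
    rw [rd_stage (cwTurn st) "F" hcF1 8 (by norm_num)
        (by rw [lF1]; exact_mod_cast lt_of_lt_of_le (by norm_num) h9F)]
    have c2 : cwSource "F" (8 : Int) = ("D", 8) := by decide
    simp only [c2]
    rw [rd_stage st "D" hcD 8 (by norm_num)
        (by exact_mod_cast lt_of_lt_of_le (by norm_num) h9D)]
    have c3 : cwSource "D" (8 : Int) = ("B", 0) := by decide
    simp only [c3]
    simp [rd]
  · have b0 : ((j : Nat) : Int) < (v.length : Int) := by exact_mod_cast hjv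
    have b1 : ((j : Nat) : Int) < ((nfv st "U" v).length : Int) := by
      rw [len_nfv]; exact_mod_cast hjv
    simp only [cwSource_U_id j e2 e5 e8]
    rw [hU2, rd_nfv (cwTurn st) "U" (nfv st "U" v) (j : Int) (by positivity) b1]
    simp only [cwSource_U_id j e2 e5 e8]
    rw [hU1, rd_nfv st "U" v (j : Int) (by positivity) b0]
    simp only [cwSource_U_id j e2 e5 e8]
    rw [hv, PySem.List.pyGetD_ofNat v j "" hjv]
    simp [Ne.symm e2, Ne.symm e5, Ne.symm e8]

theorem nfv3_B (st : PySem.Dict String (List String)) (v : List String)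
    (hv : st.getD "B" [] = v) (_h9 : 9 ≤ v.length)
    (hcB : st.contains "B" = true) (hcU : st.contains "U" = true)
    (hcF : st.contains "F" = true)
    (h9U : 9 ≤ (st.getD "U" []).length) (h9F : 9 ≤ (st.getD "F" []).length) :
    nfv (cwTurn (cwTurn st)) "B" (nfv (cwTurn st) "B" (nfv st "B" v))
      = ((v.set 6 (rd st "D" 2)).set 3 (rd st "D" 5)).set 0 (rd st "D" 8) := by
  have hcB1 : (cwTurn st).contains "B" = true := by rw [contains_cwTurn]; exact hcB
  have hcU1 : (cwTurn st).contains "U" = true := by rw [contains_cwTurn]; exact hcU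
  have hB1 : (cwTurn st).getD "B" [] = nfv st "B" v := by rw [getD_cwTurn st "B" hcB, hv]
  have hB2 : (cwTurn (cwTurn st)).getD "B" [] = nfv (cwTurn st) "B" (nfv st "B" v) := by
    rw [getD_cwTurn _ "B" hcB1, hB1]
  have lU1 : ((cwTurn st).getD "U" []).length = (st.getD "U" []).length := len_stage st "U" hcU
  rw [nfv_eq_map_range]
  apply List.ext_getElem
  · simp [len_nfv]
  intro j hj hj'
  simp only [List.getElem_map, List.getElem_range]
  have hjv : j < v.length := by simpa [len_nfv] using hj
  by_cases e6 : j = 6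
  · subst e6
    have c1 : cwSource "B" (((6 : Nat) : Nat) : Int) = ("U", 2) := by decide
    simp only [c1]
    rw [rd_stage (cwTurn st) "U" hcU1 2 (by norm_num)
        (by rw [lU1]; exact_mod_cast lt_of_lt_of_le (by norm_num) h9U)]
    have c2 : cwSource "U" (2 : Int) = ("F", 2) := by decide
    simp only [c2]
    rw [rd_stage st "F" hcF 2 (by norm_num)
        (by exact_mod_cast lt_of_lt_of_le (by norm_num) h9F)]
    have c3 : cwSource "F" (2 : Int) = ("D", 2) := by decide
    simp only [c3]
    simp [rd]
  by_cases e3 : j = 3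
  · subst e3
    have c1 : cwSource "B" (((3 : Nat) : Nat) : Int) = ("U", 5) := by decide
    simp only [c1]
    rw [rd_stage (cwTurn st) "U" hcU1 5 (by norm_num)
        (by rw [lU1]; exact_mod_cast lt_of_lt_of_le (by norm_num) h9U)]
    have c2 : cwSource "U" (5 : Int) = ("F", 5) := by decide
    simp only [c2]
    rw [rd_stage st "F" hcF 5 (by norm_num)
        (by exact_mod_cast lt_of_lt_of_le (by norm_num) h9F)]
    have c3 : cwSource "F" (5 : Int) = ("D", 5) := by decide
    simp only [c3]
    simp [rd]
  by_cases e0 : j = 0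
  · subst e0
    have c1 : cwSource "B" (((0 : Nat) : Nat) : Int) = ("U", 8) := by decide
    simp only [c1]
    rw [rd_stage (cwTurn st) "U" hcU1 8 (by norm_num)
        (by rw [lU1]; exact_mod_cast lt_of_lt_of_le (by norm_num) h9U)]
    have c2 : cwSource "U" (8 : Int) = ("F", 8) := by decide
    simp only [c2]
    rw [rd_stage st "F" hcF 8 (by norm_num)
        (by exact_mod_cast lt_of_lt_of_le (by norm_num) h9F)]
    have c3 : cwSource "F" (8 : Int) = ("D", 8) := by decide
    simp only [c3]
    simp [rd]
  · have b0 : ((j : Nat) : Int) < (v.length : Int) := by exact_mod_cast hjv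
    have b1 : ((j : Nat) : Int) < ((nfv st "B" v).length : Int) := by
      rw [len_nfv]; exact_mod_cast hjv
    simp only [cwSource_B_id j e0 e3 e6]
    rw [hB2, rd_nfv (cwTurn st) "B" (nfv st "B" v) (j : Int) (by positivity) b1]
    simp only [cwSource_B_id j e0 e3 e6]
    rw [hB1, rd_nfv st "B" v (j : Int) (by positivity) b0]
    simp only [cwSource_B_id j e0 e3 e6]
    rw [hv, PySem.List.pyGetD_ofNat v j "" hjv]
    simp [Ne.symm e0, Ne.symm e3, Ne.symm e6]

theorem nfv3_D (st : PySem.Dict String (List String)) (v : List String)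
    (hv : st.getD "D" [] = v) (_h9 : 9 ≤ v.length)
    (hcD : st.contains "D" = true) (hcB : st.contains "B" = true)
    (hcU : st.contains "U" = true)
    (h9B : 9 ≤ (st.getD "B" []).length) (h9U : 9 ≤ (st.getD "U" []).length) :
    nfv (cwTurn (cwTurn st)) "D" (nfv (cwTurn st) "D" (nfv st "D" v))
      = ((v.set 2 (rd st "F" 2)).set 5 (rd st "F" 5)).set 8 (rd st "F" 8) := by
  have hcD1 : (cwTurn st).contains "D" = true := by rw [contains_cwTurn]; exact hcD
  have hcB1 : (cwTurn st).contains "B" = true := by rw [contains_cwTurn]; exact hcB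
  have hD1 : (cwTurn st).getD "D" [] = nfv st "D" v := by rw [getD_cwTurn st "D" hcD, hv]
  have hD2 : (cwTurn (cwTurn st)).getD "D" [] = nfv (cwTurn st) "D" (nfv st "D" v) := by
    rw [getD_cwTurn _ "D" hcD1, hD1]
  have lB1 : ((cwTurn st).getD "B" []).length = (st.getD "B" []).length := len_stage st "B" hcB
  rw [nfv_eq_map_range]
  apply List.ext_getElem
  · simp [len_nfv]
  intro j hj hj'
  simp only [List.getElem_map, List.getElem_range]
  have hjv : j < v.length := by simpa [len_nfv] using hj
  by_cases e2 : j = 2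
  · subst e2
    have c1 : cwSource "D" (((2 : Nat) : Nat) : Int) = ("B", 6) := by decide
    simp only [c1]
    rw [rd_stage (cwTurn st) "B" hcB1 6 (by norm_num)
        (by rw [lB1]; exact_mod_cast lt_of_lt_of_le (by norm_num) h9B)]
    have c2 : cwSource "B" (6 : Int) = ("U", 2) := by decide
    simp only [c2]
    rw [rd_stage st "U" hcU 2 (by norm_num)
        (by exact_mod_cast lt_of_lt_of_le (by norm_num) h9U)]
    have c3 : cwSource "U" (2 : Int) = ("F", 2) := by decide
    simp only [c3]
    simp [rd]
  by_cases e5 : j = 5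
  · subst e5
    have c1 : cwSource "D" (((5 : Nat) : Nat) : Int) = ("B", 3) := by decide
    simp only [c1]
    rw [rd_stage (cwTurn st) "B" hcB1 3 (by norm_num)
        (by rw [lB1]; exact_mod_cast lt_of_lt_of_le (by norm_num) h9B)]
    have c2 : cwSource "B" (3 : Int) = ("U", 5) := by decide
    simp only [c2]
    rw [rd_stage st "U" hcU 5 (by norm_num)
        (by exact_mod_cast lt_of_lt_of_le (by norm_num) h9U)]
    have c3 : cwSource "U" (5 : Int) = ("F", 5) := by decide
    simp only [c3]
    simp [rd]
  by_cases e8 : j = 8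
  · subst e8
    have c1 : cwSource "D" (((8 : Nat) : Nat) : Int) = ("B", 0) := by decide
    simp only [c1]
    rw [rd_stage (cwTurn st) "B" hcB1 0 (by norm_num)
        (by rw [lB1]; exact_mod_cast lt_of_lt_of_le (by norm_num) h9B)]
    have c2 : cwSource "B" (0 : Int) = ("U", 8) := by decide
    simp only [c2]
    rw [rd_stage st "U" hcU 8 (by norm_num)
        (by exact_mod_cast lt_of_lt_of_le (by norm_num) h9U)]
    have c3 : cwSource "U" (8 : Int) = ("F", 8) := by decide
    simp only [c3]
    simp [rd]
  · have b0 : ((j : Nat) : Int) < (v.length : Int) := by exact_mod_cast hjv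
    have b1 : ((j : Nat) : Int) < ((nfv st "D" v).length : Int) := by
      rw [len_nfv]; exact_mod_cast hjv
    simp only [cwSource_D_id j e2 e5 e8]
    rw [hD2, rd_nfv (cwTurn st) "D" (nfv st "D" v) (j : Int) (by positivity) b1]
    simp only [cwSource_D_id j e2 e5 e8]
    rw [hD1, rd_nfv st "D" v (j : Int) (by positivity) b0]
    simp only [cwSource_D_id j e2 e5 e8]
    rw [hv, PySem.List.pyGetD_ofNat v j "" hjv]
    simp [Ne.symm e2, Ne.symm e5, Ne.symm e8]

theorem nfv3_F (st : PySem.Dict String (List String)) (v : List String)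
    (hv : st.getD "F" [] = v) (_h9 : 9 ≤ v.length)
    (hcF : st.contains "F" = true) (hcD : st.contains "D" = true)
    (hcB : st.contains "B" = true)
    (h9D : 9 ≤ (st.getD "D" []).length) (h9B : 9 ≤ (st.getD "B" []).length) :
    nfv (cwTurn (cwTurn st)) "F" (nfv (cwTurn st) "F" (nfv st "F" v))
      = ((v.set 2 (rd st "U" 2)).set 5 (rd st "U" 5)).set 8 (rd st "U" 8) := by
  have hcF1 : (cwTurn st).contains "F" = true := by rw [contains_cwTurn]; exact hcF
  have hcD1 : (cwTurn st).contains "D" = true := by rw [contains_cwTurn]; exact hcD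
  have hF1 : (cwTurn st).getD "F" [] = nfv st "F" v := by rw [getD_cwTurn st "F" hcF, hv]
  have hF2 : (cwTurn (cwTurn st)).getD "F" [] = nfv (cwTurn st) "F" (nfv st "F" v) := by
    rw [getD_cwTurn _ "F" hcF1, hF1]
  have lD1 : ((cwTurn st).getD "D" []).length = (st.getD "D" []).length := len_stage st "D" hcD
  rw [nfv_eq_map_range]
  apply List.ext_getElem
  · simp [len_nfv]
  intro j hj hj'
  simp only [List.getElem_map, List.getElem_range]
  have hjv : j < v.length := by simpa [len_nfv] using hj
  by_cases e2 : j = 2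
  · subst e2
    have c1 : cwSource "F" (((2 : Nat) : Nat) : Int) = ("D", 2) := by decide
    simp only [c1]
    rw [rd_stage (cwTurn st) "D" hcD1 2 (by norm_num)
        (by rw [lD1]; exact_mod_cast lt_of_lt_of_le (by norm_num) h9D)]
    have c2 : cwSource "D" (2 : Int) = ("B", 6) := by decide
    simp only [c2]
    rw [rd_stage st "B" hcB 6 (by norm_num)
        (by exact_mod_cast lt_of_lt_of_le (by norm_num) h9B)]
    have c3 : cwSource "B" (6 : Int) = ("U", 2) := by decide
    simp only [c3]
    simp [rd]
  by_cases e5 : j = 5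
  · subst e5
    have c1 : cwSource "F" (((5 : Nat) : Nat) : Int) = ("D", 5) := by decide
    simp only [c1]
    rw [rd_stage (cwTurn st) "D" hcD1 5 (by norm_num)
        (by rw [lD1]; exact_mod_cast lt_of_lt_of_le (by norm_num) h9D)]
    have c2 : cwSource "D" (5 : Int) = ("B", 3) := by decide
    simp only [c2]
    rw [rd_stage st "B" hcB 3 (by norm_num)
        (by exact_mod_cast lt_of_lt_of_le (by norm_num) h9B)]
    have c3 : cwSource "B" (3 : Int) = ("U", 5) := by decide
    simp only [c3]
    simp [rd]
  by_cases e8 : j = 8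
  · subst e8
    have c1 : cwSource "F" (((8 : Nat) : Nat) : Int) = ("D", 8) := by decide
    simp only [c1]
    rw [rd_stage (cwTurn st) "D" hcD1 8 (by norm_num)
        (by rw [lD1]; exact_mod_cast lt_of_lt_of_le (by norm_num) h9D)]
    have c2 : cwSource "D" (8 : Int) = ("B", 0) := by decide
    simp only [c2]
    rw [rd_stage st "B" hcB 0 (by norm_num)
        (by exact_mod_cast lt_of_lt_of_le (by norm_num) h9B)]
    have c3 : cwSource "B" (0 : Int) = ("U", 8) := by decide
    simp only [c3]
    simp [rd]
  · have b0 : ((j : Nat) : Int) < (v.length : Int) := by exact_mod_cast hjv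
    have b1 : ((j : Nat) : Int) < ((nfv st "F" v).length : Int) := by
      rw [len_nfv]; exact_mod_cast hjv
    simp only [cwSource_F_id j e2 e5 e8]
    rw [hF2, rd_nfv (cwTurn st) "F" (nfv st "F" v) (j : Int) (by positivity) b1]
    simp only [cwSource_F_id j e2 e5 e8]
    rw [hF1, rd_nfv st "F" v (j : Int) (by positivity) b0]
    simp only [cwSource_F_id j e2 e5 e8]
    rw [hv, PySem.List.pyGetD_ofNat v j "" hjv]
    simp [Ne.symm e2, Ne.symm e5, Ne.symm e8]

theorem nfv3_R (st : PySem.Dict String (List String)) (v : List String)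
    (hv : st.getD "R" [] = v) (h9 : v.length = 9)
    (hcR : st.contains "R" = true) :
    nfv (cwTurn (cwTurn st)) "R" (nfv (cwTurn st) "R" (nfv st "R" v))
      = [pvRead v 2, pvRead v 5, pvRead v 8, pvRead v 1, pvRead v 4,
         pvRead v 7, pvRead v 0, pvRead v 3, pvRead v 6] := by
  have hcR1 : (cwTurn st).contains "R" = true := by rw [contains_cwTurn]; exact hcR
  have h1 : nfv st "R" v = [pvRead v 6, pvRead v 3, pvRead v 0, pvRead v 7, pvRead v 4,
      pvRead v 1, pvRead v 8, pvRead v 5, pvRead v 2] := nfv_R st v hv h9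
  have hv1 : (cwTurn st).getD "R" [] = nfv st "R" v := by rw [getD_cwTurn st "R" hcR, hv]
  rw [h1] at hv1
  have h2 := nfv_R (cwTurn st) _ hv1 (by simp)
  have hv2 : (cwTurn (cwTurn st)).getD "R" []
      = nfv (cwTurn st) "R" (nfv st "R" v) := by
    rw [getD_cwTurn _ "R" hcR1, hv1, h1]
  rw [h1, h2] at hv2 ⊢
  have h3 := nfv_R (cwTurn (cwTurn st)) _ hv2 (by simp)
  rw [h3]
  simp [pvRead, PySem.List.pyGetD_ofNat']

theorem nfv3_other (st : PySem.Dict String (List String)) (k : String) (v : List String)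
    (hv : st.getD k [] = v) (hc : st.contains k = true)
    (hR : k ≠ "R") (hU : k ≠ "U") (hF : k ≠ "F") (hD : k ≠ "D") (hB : k ≠ "B") :
    nfv (cwTurn (cwTurn st)) k (nfv (cwTurn st) k (nfv st k v)) = v := by
  have hc1 : (cwTurn st).contains k = true := by rw [contains_cwTurn]; exact hc
  have e1 : nfv st k v = v := nfv_other st k v hv hR hU hF hD hB
  have hv1 : (cwTurn st).getD k [] = v := by rw [getD_cwTurn st k hc, hv, e1]
  have e2 : nfv (cwTurn st) k v = v := nfv_other _ k v hv1 hR hU hF hD hB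
  have hv2 : (cwTurn (cwTurn st)).getD k [] = v := by rw [getD_cwTurn _ k hc1, hv1, e2]
  have e3 : nfv (cwTurn (cwTurn st)) k v = v := nfv_other _ k v hv2 hR hU hF hD hB
  rw [e1, e2, e3]

-- ===== VERDICT (by name: the statement is the Claim_ definition above) =====
theorem updateStateForRMove_spec : Claim_equal_updateStateForRMove := by
  intro state rotation _ hpre
  unfold Spec_updateStateForRMove
  by_cases hcw : rotation = "CW"
  · subst hcw
    obtain ⟨hnd, hfive, hR9⟩ := hpre (Or.inl rfl)
    obtain ⟨hcR, hlR⟩ := hfive "R" (by simp)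
    obtain ⟨hcU, hlU⟩ := hfive "U" (by simp)
    obtain ⟨hcF, hlF⟩ := hfive "F" (by simp)
    obtain ⟨hcD, hlD⟩ := hfive "D" (by simp)
    obtain ⟨hcB, hlB⟩ := hfive "B" (by simp)
    have hknd : (PySem.Dict.mk state).keys.Nodup := by
      simpa [PySem.Dict.keys] using hnd
    have halt : updateStateForRMove_alt state "CW" = (cwTurn (PySem.Dict.mk state)).items := rfl
    rw [halt, cwTurn_items]
    simp only [updateStateForRMove, String.reduceEq, reduceIte, pvWr]
    simp only [items_modify_W, items_insert_W,
      PySem.Dict.contains_modify, PySem.Dict.contains_insert, String.reduceBEq,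
      String.reduceEq, reduceIte, Bool.or_true,
      PySem.Dict.getD_modify, PySem.Dict.getD_insert,
      hcR, hcU, hcF, hcD, hcB, List.map_map]
    apply List.map_congr_left
    intro p hp
    have hv : (PySem.Dict.mk state).getD p.1 [] = p.2 :=
      PySem.Dict.getD_of_mem_items _ (by exact hp) hknd []
    by_cases h1 : p.1 = "U"
    · have hvU : (PySem.Dict.mk state).getD "U" [] = p.2 := h1 ▸ hv
      have h9U : 9 ≤ p.2.length := hvU ▸ hlU
      simp only [Function.comp_apply, W_app_eq, W_app_ne, h1, beq_self_eq_true,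
        String.reduceBEq]
      rw [hvU, nfv_U _ p.2 hvU h9U]
      simp [rd, pvRead, pvFace]
    by_cases h2 : p.1 = "F"
    · have hvF : (PySem.Dict.mk state).getD "F" [] = p.2 := h2 ▸ hv
      have h9F : 9 ≤ p.2.length := hvF ▸ hlF
      simp only [Function.comp_apply, W_app_eq, W_app_ne, h2, beq_self_eq_true,
        String.reduceBEq]
      rw [hvF, nfv_F _ p.2 hvF h9F]
      simp [rd, pvRead, pvFace]
    by_cases h3 : p.1 = "D"
    · have hvD : (PySem.Dict.mk state).getD "D" [] = p.2 := h3 ▸ hv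
      have h9D : 9 ≤ p.2.length := hvD ▸ hlD
      simp only [Function.comp_apply, W_app_eq, W_app_ne, h3, beq_self_eq_true,
        String.reduceBEq]
      rw [hvD, nfv_D _ p.2 hvD h9D]
      simp [rd, pvRead, pvFace]
    by_cases h4 : p.1 = "B"
    · have hvB : (PySem.Dict.mk state).getD "B" [] = p.2 := h4 ▸ hv
      have h9B : 9 ≤ p.2.length := hvB ▸ hlB
      simp only [Function.comp_apply, W_app_eq, W_app_ne, h4, beq_self_eq_true,
        String.reduceBEq]
      rw [hvB, nfv_B _ p.2 hvB h9B]
      simp [rd, pvRead, pvFace]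
    by_cases h5 : p.1 = "R"
    · have hvR : (PySem.Dict.mk state).getD "R" [] = p.2 := h5 ▸ hv
      have h9R : p.2.length = 9 := hvR ▸ hR9
      simp only [Function.comp_apply, W_app_eq, W_app_ne, h5, beq_self_eq_true,
        String.reduceBEq]
      rw [nfv_R _ p.2 hvR h9R]
      simp [rotateFaceClockwise, pvFace, hvR]
    · simp only [Function.comp_apply, W_app_ne, beq_eq_false_iff_ne.mpr h1,
        beq_eq_false_iff_ne.mpr h2, beq_eq_false_iff_ne.mpr h3,
        beq_eq_false_iff_ne.mpr h4, beq_eq_false_iff_ne.mpr h5]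
      rw [nfv_other _ p.1 p.2 hv h5 h1 h2 h3 h4]
  · by_cases hacw : rotation = "ACW"
    · subst hacw
      obtain ⟨hnd, hfive, hR9⟩ := hpre (Or.inr rfl)
      obtain ⟨hcR, hlR⟩ := hfive "R" (by simp)
      obtain ⟨hcU, hlU⟩ := hfive "U" (by simp)
      obtain ⟨hcF, hlF⟩ := hfive "F" (by simp)
      obtain ⟨hcD, hlD⟩ := hfive "D" (by simp)
      obtain ⟨hcB, hlB⟩ := hfive "B" (by simp)
      have hknd : (PySem.Dict.mk state).keys.Nodup := by
        simpa [PySem.Dict.keys] using hnd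
      have halt : updateStateForRMove_alt state "ACW"
          = (cwTurn (cwTurn (cwTurn (PySem.Dict.mk state)))).items := rfl
      rw [halt, cwTurn_items, cwTurn_items, cwTurn_items, List.map_map, List.map_map]
      simp only [updateStateForRMove, String.reduceEq, reduceIte, pvWr]
      simp only [items_modify_W, items_insert_W,
        PySem.Dict.contains_modify, PySem.Dict.contains_insert, String.reduceBEq,
        String.reduceEq, reduceIte, Bool.or_true,
        PySem.Dict.getD_modify, PySem.Dict.getD_insert,
        hcR, hcU, hcF, hcD, hcB, List.map_map]
      apply List.map_congr_left
      intro p hp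
      have hv : (PySem.Dict.mk state).getD p.1 [] = p.2 :=
        PySem.Dict.getD_of_mem_items _ (by exact hp) hknd []
      by_cases h1 : p.1 = "U"
      · have hvU : (PySem.Dict.mk state).getD "U" [] = p.2 := h1 ▸ hv
        have h9U : 9 ≤ p.2.length := hvU ▸ hlU
        simp only [Function.comp_apply, W_app_eq, W_app_ne, h1, beq_self_eq_true,
          String.reduceBEq]
        rw [hvU, nfv3_U _ p.2 hvU h9U hcU hcF hcD hlF hlD]
        simp [rd, pvRead, pvFace]
      by_cases h2 : p.1 = "F"
      · have hvF : (PySem.Dict.mk state).getD "F" [] = p.2 := h2 ▸ hv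
        have h9F : 9 ≤ p.2.length := hvF ▸ hlF
        simp only [Function.comp_apply, W_app_eq, W_app_ne, h2, beq_self_eq_true,
          String.reduceBEq]
        rw [hvF, nfv3_F _ p.2 hvF h9F hcF hcD hcB hlD hlB]
        simp [rd, pvRead, pvFace]
      by_cases h3 : p.1 = "D"
      · have hvD : (PySem.Dict.mk state).getD "D" [] = p.2 := h3 ▸ hv
        have h9D : 9 ≤ p.2.length := hvD ▸ hlD
        simp only [Function.comp_apply, W_app_eq, W_app_ne, h3, beq_self_eq_true,
          String.reduceBEq]
        rw [hvD, nfv3_D _ p.2 hvD h9D hcD hcB hcU hlB hlU]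
        simp [rd, pvRead, pvFace]
      by_cases h4 : p.1 = "B"
      · have hvB : (PySem.Dict.mk state).getD "B" [] = p.2 := h4 ▸ hv
        have h9B : 9 ≤ p.2.length := hvB ▸ hlB
        simp only [Function.comp_apply, W_app_eq, W_app_ne, h4, beq_self_eq_true,
          String.reduceBEq]
        rw [hvB, nfv3_B _ p.2 hvB h9B hcB hcU hcF hlU hlF]
        simp [rd, pvRead, pvFace]
      by_cases h5 : p.1 = "R"
      · have hvR : (PySem.Dict.mk state).getD "R" [] = p.2 := h5 ▸ hv
        have h9R : p.2.length = 9 := hvR ▸ hR9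
        simp only [Function.comp_apply, W_app_eq, W_app_ne, h5, beq_self_eq_true,
          String.reduceBEq]
        rw [nfv3_R _ p.2 hvR h9R hcR]
        simp [rotateFaceAnticlockwise, pvFace, hvR]
      · simp only [Function.comp_apply, W_app_ne, beq_eq_false_iff_ne.mpr h1,
          beq_eq_false_iff_ne.mpr h2, beq_eq_false_iff_ne.mpr h3,
          beq_eq_false_iff_ne.mpr h4, beq_eq_false_iff_ne.mpr h5]
        have hcp : (PySem.Dict.mk state).contains p.1 = true := by
          have hm : p.1 ∈ (PySem.Dict.mk state).keys := by
            simpa [PySem.Dict.keys] using List.mem_map_of_mem (f := Prod.fst) hp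
          exact (PySem.Dict.contains_iff_mem_keys _ _).mpr hm
        rw [nfv3_other _ p.1 p.2 hv hcp h5 h1 h2 h3 h4]
    · have halt : updateStateForRMove_alt state rotation
          = ((PySem.List.pyRange 0
              ((PySem.Dict.mk [("CW", (1 : Int)), ("ACW", (3 : Int))]).getD rotation 0) 1).foldl
              (fun d _ => cwTurn d) (PySem.Dict.mk state)).items := rfl
      have hb1 : ("CW" == rotation) = false := by
        simpa using fun h => hcw h.symm
      have hb2 : ("ACW" == rotation) = false := by
        simpa using fun h => hacw h.symm
      have ht : (PySem.Dict.mk [("CW", (1 : Int)), ("ACW", (3 : Int))]).getD rotation 0 = 0 := by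
        simp [PySem.Dict.getD_eq_get?_getD, hb1, hb2, PySem.Dict.get?]
      rw [halt, ht]
      have hr0 : PySem.List.pyRange 0 (0 : Int) 1 = [] := by decide
      rw [hr0]
      simp only [updateStateForRMove, if_neg hcw, if_neg hacw, List.foldl_nil]
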